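-- pv_equiv track=rewrite | github.com/peterkaminski/ogm-2025-11-13 | _bin/analyze-chat-coverage.py | find_wiki_page
-- ===== SOURCE A (Python) =====
-- def find_wiki_page(topic, existing_pages):
--     """Try to find corresponding wiki page for a topic."""
--     topic_lower = topic.lower()
--
--     # Direct match
--     for page in existing_pages:
--         if page.lower() == topic_lower:
--             return page
--
--     # Partial match
--     for page in existing_pages:
--         if topic_lower in page.lower() or page.lower() in topic_lower:
--             return page
--
--     return None
-- ===== SOURCE B (Python) =====
-- def find_wiki_page(topic, existing_pages):
--     """Try to find corresponding wiki page for a topic."""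
--     topic_lower = topic.lower()
--     candidate = None
--     for page in existing_pages:
--         page_lower = page.lower()
--         if page_lower == topic_lower:
--             return page
--         if candidate is None and (topic_lower in page_lower or page_lower in topic_lower):
--             candidate = page
--     return candidate
-- ===== Notes on version B (the rewrite author's own statement) =====
-- stated objective: alternative
-- what changed: Replaces A's two sequential scans (exact scan, then partial scan) with a single pass that returns immediately on an exact match and remembers the first partial match in a candidate variable returned after the loop.
import Mathlib
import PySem

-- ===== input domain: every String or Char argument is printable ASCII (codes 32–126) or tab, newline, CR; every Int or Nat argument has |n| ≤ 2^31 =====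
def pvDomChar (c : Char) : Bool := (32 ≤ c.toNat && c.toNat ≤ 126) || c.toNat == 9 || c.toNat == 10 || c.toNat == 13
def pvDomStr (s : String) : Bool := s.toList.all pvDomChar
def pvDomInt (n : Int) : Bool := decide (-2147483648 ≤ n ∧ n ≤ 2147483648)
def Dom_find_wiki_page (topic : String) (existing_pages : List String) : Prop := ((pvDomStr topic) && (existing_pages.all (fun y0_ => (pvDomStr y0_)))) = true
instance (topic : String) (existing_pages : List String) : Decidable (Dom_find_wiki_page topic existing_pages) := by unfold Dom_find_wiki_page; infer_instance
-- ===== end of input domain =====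

-- B replaces A's two sequential scans with a single pass that returns an exact match immediately
-- and remembers the first partial match in a candidate variable (alternative decomposition, same cost).


-- ===== PORT A =====
-- two sequential scans: first loop looks for an exact (lowercased) match, second for a partial match
def find_wiki_page (topic : String) (existing_pages : List String) : Option String :=
  let topic_lower := PySem.Str.lower topic
  match existing_pages.find? (fun page => PySem.Str.lower page == topic_lower) with
  | some page => some page
  | none =>
    match existing_pages.find? (fun page =>
        PySem.Str.isIn topic_lower (PySem.Str.lower page) ||
        PySem.Str.isIn (PySem.Str.lower page) topic_lower) with
    | some page => some page
    | none => none

-- ===== PORT B =====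
-- single pass: return immediately on an exact match, remember the first partial match
def find_wiki_page_alt_loop (topic_lower : String) (candidate : Option String) :
    List String → Option String
  | [] => candidate
  | page :: rest =>
    let page_lower := PySem.Str.lower page
    if page_lower == topic_lower then some page
    else if candidate.isNone &&
        (PySem.Str.isIn topic_lower page_lower || PySem.Str.isIn page_lower topic_lower) then
      find_wiki_page_alt_loop topic_lower (some page) rest
    else
      find_wiki_page_alt_loop topic_lower candidate rest

def find_wiki_page_alt (topic : String) (existing_pages : List String) : Option String :=
  find_wiki_page_alt_loop (PySem.Str.lower topic) none existing_pages

-- ===== PRECONDITION & SPEC =====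
def Spec_find_wiki_page (topic : String) (existing_pages : List String) (out : Option String) : Prop := out = find_wiki_page_alt topic existing_pages
instance (topic : String) (existing_pages : List String) (out : Option String) : Decidable (Spec_find_wiki_page topic existing_pages out) := by unfold Spec_find_wiki_page; infer_instance

-- ===== CLAIM (what is proved, stated in full; the proofs are below) =====
def Claim_equal_find_wiki_page : Prop := ∀ (topic : String) (existing_pages : List String), Dom_find_wiki_page topic existing_pages → Spec_find_wiki_page topic existing_pages (find_wiki_page topic existing_pages)

-- ===== LEMMAS AND PROOFS =====

-- Invariant of B's single pass: it returns the first exact match if any, otherwise the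
-- carried candidate, otherwise the first partial match.
theorem find_wiki_page_alt_loop_eq (tl : String) (cand : Option String) (ps : List String) :
    find_wiki_page_alt_loop tl cand ps =
      (ps.find? (fun page => PySem.Str.lower page == tl)).or
        (cand.or (ps.find? (fun page =>
          PySem.Str.isIn tl (PySem.Str.lower page) ||
          PySem.Str.isIn (PySem.Str.lower page) tl))) := by
  induction ps generalizing cand with
  | nil => simp only [find_wiki_page_alt_loop, List.find?_nil, Option.or_none, Option.none_or]
  | cons p rest ih =>
    simp only [find_wiki_page_alt_loop, List.find?_cons]
    by_cases hex : (PySem.Str.lower p == tl) = true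
    · simp only [hex, if_true, Option.some_or]
    · rw [Bool.not_eq_true] at hex
      simp only [hex, Bool.false_eq_true, if_false]
      by_cases hpar : (PySem.Str.isIn tl (PySem.Str.lower p) ||
          PySem.Str.isIn (PySem.Str.lower p) tl) = true
      · cases cand with
        | none =>
          simp only [Option.isNone_none, Bool.true_and, hpar, if_true, ih,
            Option.none_or, Option.some_or]
        | some c =>
          simp only [Option.isNone_some, Bool.false_and, Bool.false_eq_true, if_false, ih,
            hpar, Option.some_or]
      · rw [Bool.not_eq_true] at hpar
        simp only [hpar, Bool.and_false, Bool.false_eq_true, if_false, ih]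

-- ===== VERDICT (by name: the statement is the Claim_ definition above) =====
theorem find_wiki_page_spec : Claim_equal_find_wiki_page := by
  intro topic existing_pages _
  unfold Spec_find_wiki_page find_wiki_page find_wiki_page_alt
  rw [find_wiki_page_alt_loop_eq]
  cases hex : existing_pages.find? (fun page => PySem.Str.lower page == PySem.Str.lower topic) <;>
    cases hpar : existing_pages.find? (fun page =>
        PySem.Str.isIn (PySem.Str.lower topic) (PySem.Str.lower page) ||
        PySem.Str.isIn (PySem.Str.lower page) (PySem.Str.lower topic)) <;>
    simp only [hex, hpar, Option.or_none, Option.none_or, Option.some_or]
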